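-- pv_equiv track=rewrite | github.com/tiiuae/sbomnix | sbomnix/derivation.py | split_components
-- ===== SOURCE A (Python) =====
-- def category(char):
--     """Classify `char` into: punctuation, digit, non-digit."""
--     if char in (".", "-"):
--         return 0
--     if char in ("0", "1", "2", "3", "4", "5", "6", "7", "8", "9"):
--         return 1
--     return 2
--
-- def split_components(v):
--     """Yield cohesive groups of digits or non-digits. Skip punctuation."""
--     start = 0
--     stop = len(v)
--     while start < stop:
--         cat0 = category(v[start])
--         i = start + 1
--         while i < stop and category(v[i]) == cat0:
--             i += 1
--         if cat0 != 0:
--             yield v[start:i]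
--         start = i
-- ===== SOURCE B (Python) =====
-- def category(char):
--     """Classify `char` into: punctuation, digit, non-digit."""
--     if char in (".", "-"):
--         return 0
--     if char in ("0", "1", "2", "3", "4", "5", "6", "7", "8", "9"):
--         return 1
--     return 2
--
-- def split_components(v):
--     """Yield cohesive groups of digits or non-digits. Skip punctuation."""
--     parts = []
--     prev = 0
--     for ch in v:
--         cat = category(ch)
--         if cat == 0:
--             prev = 0
--         elif cat == prev:
--             parts[-1] += ch
--         else:
--             parts.append(ch)
--             prev = cat
--     yield from parts
-- ===== Notes on version B (the rewrite author's own statement) =====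
-- stated objective: alternative
-- what changed: A scans runs with nested index-based while loops and yields slices v[start:i]; B is a single character-at-a-time state-machine fold that builds the output list incrementally, extending its last element (parts[-1] += ch) while the category is unchanged and starting a new element on a category change, with punctuation resetting the state.
import Mathlib
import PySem

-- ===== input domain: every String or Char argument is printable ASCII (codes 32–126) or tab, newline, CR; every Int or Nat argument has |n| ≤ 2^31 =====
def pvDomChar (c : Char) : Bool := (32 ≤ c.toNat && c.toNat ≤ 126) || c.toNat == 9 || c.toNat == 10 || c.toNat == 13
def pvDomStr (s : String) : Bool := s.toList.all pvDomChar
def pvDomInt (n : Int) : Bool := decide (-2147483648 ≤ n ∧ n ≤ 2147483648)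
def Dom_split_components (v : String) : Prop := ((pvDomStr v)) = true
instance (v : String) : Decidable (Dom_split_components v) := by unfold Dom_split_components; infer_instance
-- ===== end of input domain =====

-- B replaces A's nested index-based run-scanning loops with a single character-at-a-time
-- state-machine fold that extends the last output element in place; objective: alternative.

-- ===== PORT A =====
-- category(char)
def category (c : Char) : Int :=
  if c = '.' ∨ c = '-' then 0
  else if c = '0' ∨ c = '1' ∨ c = '2' ∨ c = '3' ∨ c = '4' ∨ c = '5' ∨ c = '6' ∨ c = '7' ∨ c = '8' ∨ c = '9' then 1
  else 2

-- inner while: advance i while category(v[i]) == cat0; returns (run consumed, remainder)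
def runA (cat0 : Int) : List Char → List Char × List Char
  | [] => ([], [])
  | c :: rest =>
      if category c = cat0 then
        let p := runA cat0 rest
        (c :: p.1, p.2)
      else ([], c :: rest)

theorem runA_snd_length (cat0 : Int) (l : List Char) : (runA cat0 l).2.length ≤ l.length := by
  induction l with
  | nil => simp [runA]
  | cons c rest ih =>
      simp only [runA]
      split
      · exact Nat.le_succ_of_le ih
      · simp

-- outer while over the remaining suffix (start index ↦ suffix of v)
def goA : List Char → List String
  | [] => []
  | c :: rest =>
      let cat0 := category c
      let p := runA cat0 rest
      (if cat0 ≠ 0 then [String.ofList (c :: p.1)] else []) ++ goA p.2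
termination_by l => l.length
decreasing_by
  exact Nat.lt_succ_of_le (runA_snd_length _ _)

def split_components (v : String) : List String := goA v.toList

-- ===== PORT B =====
-- parts[-1] += ch  (the loop invariant guarantees parts is nonempty when this runs)
def appendLast (parts : List String) (ch : Char) : List String :=
  match parts with
  | [] => []
  | [s] => [s.push ch]
  | s :: rest => s :: appendLast rest ch

-- one iteration of B's for loop: state = (parts, prev)
def stepB (st : List String × Int) (ch : Char) : List String × Int :=
  let cat := category ch
  if cat = 0 then (st.1, 0)
  else if cat = st.2 then (appendLast st.1 ch, st.2)
  else (st.1 ++ [ch.toString], cat)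

def split_components_alt (v : String) : List String :=
  (v.toList.foldl stepB ([], 0)).1

-- ===== PRECONDITION & SPEC =====
def Spec_split_components (v : String) (out : List String) : Prop := out = split_components_alt v
instance (v : String) (out : List String) : Decidable (Spec_split_components v out) := by unfold Spec_split_components; infer_instance

-- ===== CLAIM (what is proved, stated in full; the proofs are below) =====
def Claim_equal_split_components : Prop := ∀ (v : String), Dom_split_components v → Spec_split_components v (split_components v)

-- ===== LEMMAS AND PROOFS =====

-- extending the last element with a whole run of characters
def extLast (parts : List String) (cs : List Char) : List String :=
  cs.foldl appendLast parts

theorem appendLast_concat (xs : List String) (s : String) (ch : Char) :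
    appendLast (xs ++ [s]) ch = xs ++ [s.push ch] := by
  induction xs with
  | nil => rfl
  | cons x xs ih =>
      cases xs with
      | nil => rfl
      | cons y ys => simpa [appendLast] using ih

theorem extLast_concat (xs : List String) (s : String) (cs : List Char) :
    extLast (xs ++ [s]) cs = xs ++ [s ++ String.ofList cs] := by
  induction cs generalizing s with
  | nil =>
      show xs ++ [s] = xs ++ [s ++ String.ofList []]
      have : s ++ String.ofList [] = s := String.ext (by simp)
      rw [this]
  | cons c cs ih =>
      show extLast (appendLast (xs ++ [s]) c) cs = _
      rw [appendLast_concat, ih]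
      have : s.push c ++ String.ofList cs = s ++ String.ofList (c :: cs) :=
        String.ext (by simp)
      rw [this]

-- dropping a leading punctuation run does not change goA's output
theorem goA_punct (l : List Char) : goA (runA 0 l).2 = goA l := by
  cases l with
  | nil => simp [runA]
  | cons c rest =>
      by_cases h : category c = 0
      · rw [goA]
        simp [runA, h]
      · simp [runA, h]

-- main invariant of B's fold
theorem foldB_eq (l : List Char) :
    ∀ (parts : List String) (cat : Int),
      (List.foldl stepB (parts, cat) l).1 =
        if cat = 0 then parts ++ goA l
        else extLast parts (runA cat l).1 ++ goA (runA cat l).2 := by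
  induction l with
  | nil =>
      intro parts cat
      split_ifs with h
      · simp [goA]
      · simp [runA, extLast, goA]
  | cons c rest ih =>
      intro parts cat
      by_cases h0 : cat = 0
      · subst h0
        rw [if_pos rfl]
        by_cases hc : category c = 0
        · have : stepB (parts, (0 : Int)) c = (parts, 0) := by simp [stepB, hc]
          rw [List.foldl_cons, this, ih parts 0, if_pos rfl, goA]
          simp [hc, goA_punct]
        · have hstep : stepB (parts, (0 : Int)) c = (parts ++ [c.toString], category c) := by
            simp [stepB, hc]
          rw [List.foldl_cons, hstep, ih _ _, if_neg hc]
          have hrw : extLast (parts ++ [c.toString]) (runA (category c) rest).1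
              = parts ++ [String.ofList (c :: (runA (category c) rest).1)] := by
            rw [extLast_concat]
            have : c.toString ++ String.ofList (runA (category c) rest).1
                = String.ofList (c :: (runA (category c) rest).1) := String.ext (by simp)
            rw [this]
          rw [hrw, goA]
          simp [hc]
      · simp only [if_neg h0]
        by_cases hc : category c = cat
        · have : stepB (parts, cat) c = (appendLast parts c, cat) := by
            simp [stepB, hc, h0]
          rw [List.foldl_cons, this, ih _ _, if_neg h0]
          have : runA cat (c :: rest) = (c :: (runA cat rest).1, (runA cat rest).2) := by
            simp [runA, hc]
          rw [this]
          rfl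
        · have hr : runA cat (c :: rest) = ([], c :: rest) := by simp [runA, hc]
          rw [hr]
          by_cases hp : category c = 0
          · have : stepB (parts, cat) c = (parts, 0) := by simp [stepB, hp]
            rw [List.foldl_cons, this, ih parts 0, if_pos rfl, goA]
            simp [extLast, hp, goA_punct]
          · have hstep : stepB (parts, cat) c = (parts ++ [c.toString], category c) := by
              simp [stepB, hp, hc]
            rw [List.foldl_cons, hstep, ih _ _, if_neg hp]
            have hrw : extLast (parts ++ [c.toString]) (runA (category c) rest).1
                = parts ++ [String.ofList (c :: (runA (category c) rest).1)] := by
              rw [extLast_concat]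
              have : c.toString ++ String.ofList (runA (category c) rest).1
                  = String.ofList (c :: (runA (category c) rest).1) := String.ext (by simp)
              rw [this]
            rw [hrw, goA]
            simp [extLast, hp]

-- ===== VERDICT (by name: the statement is the Claim_ definition above) =====
theorem split_components_spec : Claim_equal_split_components := by
  intro v _
  unfold Spec_split_components split_components split_components_alt
  rw [foldB_eq, if_pos rfl]
  simp
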